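-- pv_equiv track=rewrite | github.com/juspay/connector-service | generate_connector_matrix.py | get_all_flows
-- ===== SOURCE A (Python) =====
-- from typing import Dict, List, Set
--
-- def get_all_flows(connector_flows: Dict[str, Set[str]]) -> List[str]:
--     """Get all unique flows across all connectors, sorted."""
--     all_flows = set()
--     for flows in connector_flows.values():
--         all_flows.update(flows)
--
--     # Exclude unstable dispute flows
--     excluded_flows = {'Accept', 'DefendDispute', 'SubmitEvidence'}
--     all_flows = all_flows - excluded_flows
--
--     # Define a custom sort order for common flows
--     flow_order = [
--         'Authorize',
--         'PSync',
--         'Capture',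
--         'Void',
--         'Refund',
--         'RSync',
--         'SetupMandate',
--         'RepeatPayment',
--         'CreateOrder',
--         'CreateSessionToken',
--         'CreateAccessToken',
--         'PaymentMethodToken',
--         'CreateConnectorCustomer',
--         'PreAuthenticate',
--         'Authenticate',
--         'PostAuthenticate',
--     ]
--
--     # Sort flows: known flows first in order, then alphabetically
--     sorted_flows = []
--     for flow in flow_order:
--         if flow in all_flows:
--             sorted_flows.append(flow)
--             all_flows.remove(flow)
--
--     # Add remaining flows alphabetically
--     sorted_flows.extend(sorted(all_flows))
--
--     return sorted_flows
-- ===== SOURCE B (Python) =====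
-- def get_all_flows(connector_flows):
--     """Get all unique flows across all connectors, sorted."""
--     # Explicit priority table; any flow not in it shares rank 16 and is
--     # tie-broken alphabetically by the second key component.
--     rank = {
--         'Authorize': 0, 'PSync': 1, 'Capture': 2, 'Void': 3,
--         'Refund': 4, 'RSync': 5, 'SetupMandate': 6, 'RepeatPayment': 7,
--         'CreateOrder': 8, 'CreateSessionToken': 9, 'CreateAccessToken': 10,
--         'PaymentMethodToken': 11, 'CreateConnectorCustomer': 12,
--         'PreAuthenticate': 13, 'Authenticate': 14, 'PostAuthenticate': 15,
--     }
--     excluded = ('Accept', 'DefendDispute', 'SubmitEvidence')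
--     pool = {f for flows in connector_flows.values() for f in flows if f not in excluded}
--     return sorted(pool, key=lambda f: (rank.get(f, 16), f))
-- ===== Notes on version B (the rewrite author's own statement) =====
-- stated objective: simpler
-- what changed: Replaces A's staged construction (set-union loop, set difference, an extraction loop over flow_order that appends and removes matches, a second sort of the leftovers, list concatenation) with one comprehension that collects non-excluded flows and a single sorted() keyed by (explicit priority-table rank with fallback 16, flow name).
import Mathlib
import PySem

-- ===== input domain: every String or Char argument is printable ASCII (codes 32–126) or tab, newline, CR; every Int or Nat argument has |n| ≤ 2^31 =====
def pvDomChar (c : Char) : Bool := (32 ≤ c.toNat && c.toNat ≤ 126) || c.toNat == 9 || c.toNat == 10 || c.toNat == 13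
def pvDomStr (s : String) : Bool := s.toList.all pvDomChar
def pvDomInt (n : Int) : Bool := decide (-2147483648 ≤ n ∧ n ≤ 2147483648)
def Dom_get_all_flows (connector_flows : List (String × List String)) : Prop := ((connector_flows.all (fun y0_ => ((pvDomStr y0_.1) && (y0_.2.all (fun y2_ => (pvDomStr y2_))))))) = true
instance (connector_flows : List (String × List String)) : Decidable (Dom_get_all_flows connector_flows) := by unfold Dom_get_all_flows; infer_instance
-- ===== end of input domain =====

-- B replaces A's staged construction (union loop, set difference, extraction loop
-- over flow_order, second sort, concatenation) by one filtered comprehension and a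
-- single sort keyed by (explicit priority-table rank with fallback, name) — objective: simpler.

-- ===== PORT A =====
def get_all_flows (connector_flows : List (String × List String)) : List String :=
  let all_flows : PySem.Set String :=
    connector_flows.foldl (fun s p => PySem.Set.update s p.2) PySem.Set.empty
  let all_flows :=
    PySem.Set.diff all_flows (PySem.Set.ofList ["Accept", "DefendDispute", "SubmitEvidence"])
  let flow_order : List String :=
    ["Authorize", "PSync", "Capture", "Void", "Refund", "RSync", "SetupMandate",
     "RepeatPayment", "CreateOrder", "CreateSessionToken", "CreateAccessToken",
     "PaymentMethodToken", "CreateConnectorCustomer", "PreAuthenticate",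
     "Authenticate", "PostAuthenticate"]
  -- 'all_flows.remove(flow)' runs only under the membership test, where it equals Set.discard (exact)
  let st := flow_order.foldl
    (fun (st : List String × PySem.Set String) flow =>
      if PySem.Set.contains st.2 flow then (st.1 ++ [flow], PySem.Set.discard st.2 flow) else st)
    ([], all_flows)
  st.1 ++ PySem.List.sorted st.2 (fun x => x)

-- ===== PORT B =====
def get_all_flows_alt (connector_flows : List (String × List String)) : List String :=
  let rank : PySem.Dict String Int :=
    PySem.Dict.ofList [("Authorize", 0), ("PSync", 1), ("Capture", 2), ("Void", 3),
      ("Refund", 4), ("RSync", 5), ("SetupMandate", 6), ("RepeatPayment", 7),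
      ("CreateOrder", 8), ("CreateSessionToken", 9), ("CreateAccessToken", 10),
      ("PaymentMethodToken", 11), ("CreateConnectorCustomer", 12),
      ("PreAuthenticate", 13), ("Authenticate", 14), ("PostAuthenticate", 15)]
  let excluded : List String := ["Accept", "DefendDispute", "SubmitEvidence"]
  let pool : PySem.Set String :=
    PySem.Set.ofList
      ((connector_flows.flatMap (fun p => p.2)).filter (fun f => !(excluded.contains f)))
  PySem.List.sorted2 pool (fun f => rank.getD f 16) (fun f => f)

-- ===== PRECONDITION & SPEC =====
def Spec_get_all_flows (connector_flows : List (String × List String)) (out : List String) : Prop := out = get_all_flows_alt connector_flows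
instance (connector_flows : List (String × List String)) (out : List String) : Decidable (Spec_get_all_flows connector_flows out) := by unfold Spec_get_all_flows; infer_instance

-- ===== CLAIM (what is proved, stated in full; the proofs are below) =====
def Claim_equal_get_all_flows : Prop := ∀ (connector_flows : List (String × List String)), Dom_get_all_flows connector_flows → Spec_get_all_flows connector_flows (get_all_flows connector_flows)

-- ===== LEMMAS AND PROOFS =====

-- A's priority list
def pvFO : List String :=
  ["Authorize", "PSync", "Capture", "Void", "Refund", "RSync", "SetupMandate",
   "RepeatPayment", "CreateOrder", "CreateSessionToken", "CreateAccessToken",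
   "PaymentMethodToken", "CreateConnectorCustomer", "PreAuthenticate",
   "Authenticate", "PostAuthenticate"]

-- B's rank table and priority key
def pvRank : PySem.Dict String Int :=
  PySem.Dict.ofList [("Authorize", 0), ("PSync", 1), ("Capture", 2), ("Void", 3),
    ("Refund", 4), ("RSync", 5), ("SetupMandate", 6), ("RepeatPayment", 7),
    ("CreateOrder", 8), ("CreateSessionToken", 9), ("CreateAccessToken", 10),
    ("PaymentMethodToken", 11), ("CreateConnectorCustomer", 12),
    ("PreAuthenticate", 13), ("Authenticate", 14), ("PostAuthenticate", 15)]

def pvK1 (f : String) : Int := pvRank.getD f 16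

-- the strict order decided by B's sort key (rank, name)
def pvR (a b : String) : Prop := pvK1 a < pvK1 b ∨ (pvK1 a = pvK1 b ∧ a < b)

def pvLt (a b : String) : Bool :=
  decide (pvK1 a < pvK1 b) || (!decide (pvK1 b < pvK1 a) && decide (a < b))

lemma pvLt_iff (a b : String) : pvLt a b = true ↔ pvR a b := by
  unfold pvLt pvR
  simp only [Bool.or_eq_true, Bool.and_eq_true, Bool.not_eq_true', decide_eq_true_iff,
    decide_eq_false_iff_not]
  constructor
  · rintro (h | ⟨h1, h2⟩)
    · exact Or.inl h
    · by_cases hk : pvK1 a < pvK1 b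
      · exact Or.inl hk
      · exact Or.inr ⟨le_antisymm (not_lt.1 h1) (not_lt.1 hk), h2⟩
  · rintro (h | ⟨h1, h2⟩)
    · exact Or.inl h
    · exact Or.inr ⟨by omega, h2⟩

lemma pvR_trans {a b c : String} (h1 : pvR a b) (h2 : pvR b c) : pvR a c := by
  rcases h1 with h1 | ⟨e1, l1⟩ <;> rcases h2 with h2 | ⟨e2, l2⟩
  · exact Or.inl (lt_trans h1 h2)
  · exact Or.inl (by omega)
  · exact Or.inl (by omega)
  · exact Or.inr ⟨by omega, lt_trans l1 l2⟩

lemma pvR_asymm {a b : String} (h1 : pvR a b) (h2 : pvR b a) : False := by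
  rcases h1 with h1 | ⟨e1, l1⟩ <;> rcases h2 with h2 | ⟨e2, l2⟩
  · omega
  · omega
  · omega
  · exact lt_asymm l1 l2

lemma pvR_total {a b : String} (hne : a ≠ b) (h : ¬ pvR a b) : pvR b a := by
  unfold pvR at *
  push_neg at h
  rcases lt_trichotomy (pvK1 a) (pvK1 b) with hk | hk | hk
  · exact absurd hk (not_lt.2 h.1)
  · exact Or.inr ⟨hk.symm, lt_of_le_of_ne (h.2 hk) (fun e => hne e.symm)⟩
  · exact Or.inl hk

lemma pv_insert_pairwise (x : String) (ys : List String)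
    (h : ys.Pairwise pvR) (hx : x ∉ ys) :
    (PySem.List.insertBy pvLt x ys).Pairwise pvR := by
  induction ys with
  | nil => simp [PySem.List.insertBy]
  | cons y ys ih =>
    rw [List.pairwise_cons] at h
    by_cases hb : pvLt x y = true
    · have hxy : pvR x y := (pvLt_iff x y).1 hb
      simp only [PySem.List.insertBy, hb, if_true]
      refine List.Pairwise.cons ?_ (List.Pairwise.cons h.1 h.2)
      intro z hz
      rcases List.mem_cons.1 hz with rfl | hz
      · exact hxy
      · exact pvR_trans hxy (h.1 z hz)
    · have hxy : ¬ pvR x y := fun hc => hb ((pvLt_iff x y).2 hc)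
      have hne : x ≠ y := fun e => hx (e ▸ List.mem_cons_self)
      simp only [PySem.List.insertBy, hb]
      refine List.Pairwise.cons ?_ (ih h.2 (fun hm => hx (List.mem_cons_of_mem _ hm)))
      intro z hz
      rcases (PySem.List.insertBy_mem_iff pvLt x z ys).1 hz with rfl | hz
      · exact pvR_total hne hxy
      · exact h.1 z hz

lemma pv_fold_pairwise : ∀ (xs acc : List String), xs.Nodup → acc.Pairwise pvR →
    (∀ x ∈ xs, x ∉ acc) →
    (xs.foldl (fun acc x => PySem.List.insertBy pvLt x acc) acc).Pairwise pvR := by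
  intro xs
  induction xs with
  | nil => intro acc _ h _; simpa using h
  | cons x xs ih =>
    intro acc hnd hacc hdisj
    rw [List.nodup_cons] at hnd
    simp only [List.foldl_cons]
    refine ih _ hnd.2 (pv_insert_pairwise x acc hacc (hdisj x List.mem_cons_self)) ?_
    intro z hz hmem
    rcases (PySem.List.insertBy_mem_iff pvLt x z acc).1 hmem with rfl | hmem
    · exact hnd.1 hz
    · exact hdisj z (List.mem_cons_of_mem _ hz) hmem

-- B's sorted2, unfolded to its insertion-sort fold with our comparison
lemma pv_sorted2_eq (xs : List String) :
    PySem.List.sorted2 xs pvK1 (fun f => f)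
    = xs.foldl (fun acc x => PySem.List.insertBy pvLt x acc) [] := rfl

-- A's extraction loop, characterised: picked = fo.filter (∈ S), leftover = S.filter (∉ fo)
lemma pv_loop : ∀ (fo : List String), fo.Nodup → ∀ (acc S : List String), S.Nodup →
    fo.foldl
      (fun (st : List String × PySem.Set String) flow =>
        if PySem.Set.contains st.2 flow then (st.1 ++ [flow], PySem.Set.discard st.2 flow) else st)
      (acc, S)
    = (acc ++ List.filter (fun f => PySem.Set.contains S f) fo,
       List.filter (fun x => !(List.contains fo x)) S) := by
  intro fo
  induction fo with
  | nil => intro _ acc S _; simp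
  | cons f fo ih =>
    intro hnd acc S hS
    rw [List.nodup_cons] at hnd
    simp only [List.foldl_cons]
    by_cases hc : PySem.Set.contains S f = true
    · rw [if_pos hc,
        ih hnd.2 (acc ++ [f]) (PySem.Set.discard S f) (PySem.Set.nodup_discard S f hS)]
      have e1 : List.filter (fun g => PySem.Set.contains (PySem.Set.discard S f) g) fo
          = List.filter (fun g => PySem.Set.contains S g) fo := by
        apply List.filter_congr
        intro g hg
        have hgf : g ≠ f := fun e => hnd.1 (e ▸ hg)
        rw [PySem.Set.contains_eq_decide, PySem.Set.contains_eq_decide]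
        simp [PySem.Set.mem_discard, hgf]
      have e2 : List.filter (fun x => !(List.contains fo x)) (PySem.Set.discard S f)
          = List.filter (fun x => !(List.contains (f :: fo) x)) S := by
        show (List.filter (fun y => !y == f) S).filter (fun x => !(List.contains fo x)) = _
        rw [List.filter_filter]
        apply List.filter_congr
        intro x _
        simp [List.contains_cons, Bool.not_or, Bool.and_comm, beq_eq_decide]
      rw [e1, e2, List.filter_cons_of_pos hc, List.append_assoc, List.singleton_append]
    · rw [if_neg hc, ih hnd.2 acc S hS]
      have hmemf : f ∉ S := by
        rw [PySem.Set.contains_eq_decide] at hc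
        simpa using hc
      have e3 : List.filter (fun x => !(List.contains (f :: fo) x)) S
          = List.filter (fun x => !(List.contains fo x)) S := by
        apply List.filter_congr
        intro x hx
        have hfx : f ≠ x := fun e => hmemf (e ▸ hx)
        simp [List.contains_cons, beq_eq_decide, Ne.symm hfx]
      rw [List.filter_cons_of_neg (by simpa using hc), e3]

lemma pvK1_of_mem {x : String} (h : x ∈ pvFO) : pvK1 x < 16 := by
  fin_cases h <;> decide

lemma pvK1_of_not_mem {x : String} (h : x ∉ pvFO) : pvK1 x = 16 := by
  have hk : pvRank.get? x = none := by
    rw [PySem.Dict.get?_eq_none_iff_not_mem_keys]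
    have hkeys : pvRank.keys = pvFO := by decide
    rw [hkeys]
    exact h
  simp [pvK1, PySem.Dict.getD, hk]

lemma pvK1_strict : pvFO.Pairwise (fun a b => pvK1 a < pvK1 b) := by decide

lemma pv_fold_nodup : ∀ (cf : List (String × List String)) (s : PySem.Set String), s.Nodup →
    (cf.foldl (fun s p => PySem.Set.update s p.2) s).Nodup := by
  intro cf
  induction cf with
  | nil => intro s h; simpa using h
  | cons p cf ih =>
    intro s h
    simpa using ih _ (PySem.Set.nodup_update s p.2 h)

lemma pv_fold_mem : ∀ (cf : List (String × List String)) (s : PySem.Set String) (x : String),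
    x ∈ cf.foldl (fun s p => PySem.Set.update s p.2) s
    ↔ x ∈ s ∨ x ∈ cf.flatMap (fun p => p.2) := by
  intro cf
  induction cf with
  | nil => intro s x; simp
  | cons p cf ih =>
    intro s x
    simp [ih, PySem.Set.mem_update, or_assoc]

-- A's pool (union fold minus excluded) is a permutation of B's pool (deduped filtered flatMap)
lemma pv_pools_perm (cf : List (String × List String)) :
    (PySem.Set.diff
      (cf.foldl (fun s p => PySem.Set.update s p.2) PySem.Set.empty)
      (PySem.Set.ofList ["Accept", "DefendDispute", "SubmitEvidence"])).Perm
    (PySem.Set.ofList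
      ((cf.flatMap (fun p => p.2)).filter
        (fun f => !(List.contains ["Accept", "DefendDispute", "SubmitEvidence"] f)))) := by
  apply (List.perm_ext_iff_of_nodup
    (PySem.Set.nodup_diff _ _ (pv_fold_nodup cf PySem.Set.empty List.nodup_nil))
    (PySem.Set.nodup_ofList _)).2
  intro x
  rw [PySem.Set.mem_diff, PySem.Set.mem_ofList, PySem.Set.mem_ofList, List.mem_filter,
    pv_fold_mem]
  simp [PySem.Set.empty, and_comm]

-- insertion sort by (pvK1, name) gives the same list on permuted duplicate-free pools
lemma pv_sorted2_congr (S T : List String) (hS : S.Nodup) (hT : T.Nodup) (hp : S.Perm T) :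
    PySem.List.sorted2 S pvK1 (fun f => f) = PySem.List.sorted2 T pvK1 (fun f => f) := by
  apply List.Perm.eq_of_pairwise (le := pvR)
  · intro a b _ _ h1 h2
    exact (pvR_asymm h1 h2).elim
  · rw [pv_sorted2_eq]
    exact pv_fold_pairwise S [] hS (by simp) (by simp)
  · rw [pv_sorted2_eq]
    exact pv_fold_pairwise T [] hT (by simp) (by simp)
  · exact ((PySem.List.sorted2_perm S pvK1 (fun f => f) false).trans hp).trans
      (PySem.List.sorted2_perm T pvK1 (fun f => f) false).symm

-- the heart: on any duplicate-free pool S, A's two-phase arrangement IS the single keyed sort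
lemma pv_main (S : List String) (hS : S.Nodup) :
    (List.filter (fun f => PySem.Set.contains S f) pvFO) ++
      PySem.List.sorted (List.filter (fun x => !(List.contains pvFO x)) S) (fun x => x)
    = PySem.List.sorted2 S pvK1 (fun f => f) := by
  set P := List.filter (fun f => PySem.Set.contains S f) pvFO with hP
  set Rst := List.filter (fun x => !(List.contains pvFO x)) S with hRst
  set SR := PySem.List.sorted Rst (fun x : String => x) with hSR
  have hfo : pvFO.Nodup := by decide
  have hRstmem : ∀ x ∈ Rst, x ∈ S ∧ x ∉ pvFO := by
    intro x hx
    rw [hRst, List.mem_filter] at hx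
    exact ⟨hx.1, by simpa using hx.2⟩
  have hSRperm : SR.Perm Rst := PySem.List.sorted_perm Rst (fun x => x) false
  have hPmem : ∀ x ∈ P, x ∈ pvFO ∧ x ∈ S := by
    intro x hx
    rw [hP, List.mem_filter] at hx
    refine ⟨hx.1, ?_⟩
    have h2 := hx.2
    rw [PySem.Set.contains_eq_decide] at h2
    exact of_decide_eq_true h2
  apply List.Perm.eq_of_pairwise (le := pvR)
  · intro a b _ _ h1 h2
    exact (pvR_asymm h1 h2).elim
  · rw [List.pairwise_append]
    refine ⟨?_, ?_, ?_⟩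
    · exact (List.Pairwise.sublist List.filter_sublist pvK1_strict).imp (fun h => Or.inl h)
    · have hle : SR.Pairwise (fun a b : String => a ≤ b) :=
        PySem.List.sorted_pairwise Rst (fun x => x)
      have hnd : SR.Nodup := hSRperm.nodup_iff.2 (List.Nodup.filter _ hS)
      refine (hle.and hnd).imp_of_mem ?_
      intro a b ha hb hab
      have hka : pvK1 a = 16 := pvK1_of_not_mem (hRstmem a (hSRperm.subset ha)).2
      have hkb : pvK1 b = 16 := pvK1_of_not_mem (hRstmem b (hSRperm.subset hb)).2
      exact Or.inr ⟨by rw [hka, hkb], lt_of_le_of_ne hab.1 hab.2⟩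
    · intro a ha b hb
      have hka : pvK1 a < 16 := pvK1_of_mem (hPmem a ha).1
      have hkb : pvK1 b = 16 := pvK1_of_not_mem (hRstmem b (hSRperm.subset hb)).2
      exact Or.inl (by omega)
  · rw [pv_sorted2_eq]
    exact pv_fold_pairwise S [] hS (by simp) (by simp)
  · have h1 : (P ++ SR).Perm (P ++ Rst) := List.Perm.append_left P hSRperm
    have h2 : P.Perm (List.filter (fun x => List.contains pvFO x) S) := by
      rw [List.perm_ext_iff_of_nodup (List.Nodup.filter _ hfo) (List.Nodup.filter _ hS)]
      intro a
      simp only [hP, List.mem_filter, PySem.Set.contains_eq_decide, decide_eq_true_iff,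
        List.contains_iff_mem]
      exact and_comm
    have h3 : (P ++ Rst).Perm S := by
      refine List.Perm.trans (List.Perm.append h2 (List.Perm.refl Rst)) ?_
      exact List.filter_append_perm (fun x => List.contains pvFO x) S
    exact (h1.trans h3).trans (PySem.List.sorted2_perm S pvK1 (fun f => f) false).symm

lemma pv_ports_eq (cf : List (String × List String)) :
    get_all_flows cf = get_all_flows_alt cf := by
  have hSnd : (PySem.Set.diff
      (cf.foldl (fun s p => PySem.Set.update s p.2) PySem.Set.empty)
      (PySem.Set.ofList ["Accept", "DefendDispute", "SubmitEvidence"])).Nodup :=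
    PySem.Set.nodup_diff _ _ (pv_fold_nodup cf PySem.Set.empty List.nodup_nil)
  show (pvFO.foldl
      (fun (st : List String × PySem.Set String) flow =>
        if PySem.Set.contains st.2 flow then (st.1 ++ [flow], PySem.Set.discard st.2 flow) else st)
      ([], PySem.Set.diff
        (cf.foldl (fun s p => PySem.Set.update s p.2) PySem.Set.empty)
        (PySem.Set.ofList ["Accept", "DefendDispute", "SubmitEvidence"]))).1
    ++ PySem.List.sorted (pvFO.foldl
      (fun (st : List String × PySem.Set String) flow =>
        if PySem.Set.contains st.2 flow then (st.1 ++ [flow], PySem.Set.discard st.2 flow) else st)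
      ([], PySem.Set.diff
        (cf.foldl (fun s p => PySem.Set.update s p.2) PySem.Set.empty)
        (PySem.Set.ofList ["Accept", "DefendDispute", "SubmitEvidence"]))).2 (fun x => x)
    = PySem.List.sorted2
        (PySem.Set.ofList
          ((cf.flatMap (fun p => p.2)).filter
            (fun f => !(List.contains ["Accept", "DefendDispute", "SubmitEvidence"] f))))
        pvK1 (fun f => f)
  rw [pv_loop pvFO (by decide) [] _ hSnd]
  exact (pv_main _ hSnd).trans
    (pv_sorted2_congr _ _ hSnd (PySem.Set.nodup_ofList _) (pv_pools_perm cf))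

-- ===== VERDICT (by name: the statement is the Claim_ definition above) =====
theorem get_all_flows_spec : Claim_equal_get_all_flows := by
  intro cf _
  unfold Spec_get_all_flows
  exact pv_ports_eq cf
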